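-- pv_equiv track=rewrite | github.com/mitoclub/PyMutSpec | pymutspec/draw/spectra.py | _prepare_nice_labels
-- ===== SOURCE A (Python) =====
-- from typing import Iterable
--
-- def _prepare_nice_labels(sbs192: Iterable[str], kk=False):
--     _nice_sbs = []
--     prev = None
--     for sbs in sbs192:
--         if prev is not None and sbs[2:5] != prev[2:5]:
--             _nice_sbs.append("")
--         sbs_nice = sbs[2] + sbs[4] + ": " + sbs[0] + sbs[2] + sbs[-1] if kk else sbs
--         _nice_sbs.append(sbs_nice)
--         prev = sbs
--     return _nice_sbs
-- ===== SOURCE B (Python) =====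
-- def _prepare_nice_labels(sbs192, kk=False):
--     xs = list(sbs192)
--     keys = [s[2:5] for s in xs]
--     labels = [s[2] + s[4] + ": " + s[0] + s[2] + s[-1] for s in xs] if kk else xs
--     seps = [False] + [a != b for a, b in zip(keys, keys[1:])]
--     return [y for sep, lab in zip(seps, labels) for y in ([""] if sep else []) + [lab]]
-- ===== Notes on version B (the rewrite author's own statement) =====
-- stated objective: alternative
-- what changed: Replaces A's single online loop with prev-tracking and conditional appends by a staged, declarative pipeline: materialise the key list, the label list and a boundary-flag list (zipping the key list against its own tail), then flatten flags and labels together into the output; there is no mutable prev state and no branching loop body.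
import Mathlib
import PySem

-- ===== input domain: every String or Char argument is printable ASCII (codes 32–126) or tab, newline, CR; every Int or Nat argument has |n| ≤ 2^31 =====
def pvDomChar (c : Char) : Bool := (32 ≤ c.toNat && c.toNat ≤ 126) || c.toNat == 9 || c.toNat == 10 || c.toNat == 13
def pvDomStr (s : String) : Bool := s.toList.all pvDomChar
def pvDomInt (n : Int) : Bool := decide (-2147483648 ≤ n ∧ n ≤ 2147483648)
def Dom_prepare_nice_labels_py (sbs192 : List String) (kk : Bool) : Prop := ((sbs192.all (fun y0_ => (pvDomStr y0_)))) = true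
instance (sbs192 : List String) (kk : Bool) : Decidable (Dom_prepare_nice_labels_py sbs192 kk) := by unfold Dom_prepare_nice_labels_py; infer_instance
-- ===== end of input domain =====

-- B replaces A's online prev-tracking loop by a staged declarative pipeline (keys, labels,
-- boundary flags via zip-with-tail, then one flatten); same return value, alternative structure.

-- ===== PORT A =====

-- the group key sbs[2:5] (a slice never raises)
def pvKey (s : String) : List Char := PySem.Chars.slice s.toList (some 2) (some 5)

-- sbs[2] + sbs[4] + ": " + sbs[0] + sbs[2] + sbs[-1]
-- (character indexing via PySem.Str.pyGet?; outside Pre_ Python raises IndexError and getD supplies a dummy)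
def pvLabel (s : String) : String :=
  let c2 := (PySem.Str.pyGet? s 2).getD ' '
  let c4 := (PySem.Str.pyGet? s 4).getD ' '
  let c0 := (PySem.Str.pyGet? s 0).getD ' '
  let cl := (PySem.Str.pyGet? s (-1)).getD ' '
  String.mk [c2, c4, ':', ' ', c0, c2, cl]

def pvFmt (s : String) (kk : Bool) : String := if kk then pvLabel s else s

-- A's loop state: (accumulated _nice_sbs, prev)
def pvStepA (kk : Bool) (st : List String × Option String) (sbs : String) : List String × Option String :=
  let acc :=
    match st.2 with
    | some prev => if pvKey sbs ≠ pvKey prev then st.1 ++ [""] else st.1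
    | none => st.1
  (acc ++ [pvFmt sbs kk], some sbs)

def prepare_nice_labels_py (sbs192 : List String) (kk : Bool) : List String :=
  (sbs192.foldl (pvStepA kk) ([], none)).1

-- ===== PORT B =====

-- keys = [s[2:5] for s in xs]; labels = [...] if kk else xs
-- seps = [False] + [a != b for a, b in zip(keys, keys[1:])]
-- return [y for sep, lab in zip(seps, labels) for y in ([""] if sep else []) + [lab]]
def prepare_nice_labels_py_alt (sbs192 : List String) (kk : Bool) : List String :=
  let keys := sbs192.map pvKey
  let labels := if kk then sbs192.map pvLabel else sbs192
  let seps := false :: List.zipWith (fun a b => decide (a ≠ b)) keys keys.tail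
  (List.zipWith (fun sep lab => (if sep then [""] else []) ++ [lab]) seps labels).flatten

-- ===== PRECONDITION & SPEC =====
-- Pre_ excludes exactly the inputs where Python A raises IndexError: kk=True with some string shorter than 5 chars.
def Pre_prepare_nice_labels_py (sbs192 : List String) (kk : Bool) : Prop :=
  kk = true → ∀ s ∈ sbs192, 5 ≤ s.toList.length
instance (sbs192 : List String) (kk : Bool) : Decidable (Pre_prepare_nice_labels_py sbs192 kk) := by
  unfold Pre_prepare_nice_labels_py; infer_instance

def pvWitness_prepare_nice_labels_py : List String × Bool := (["AAAAA", "BBAAA", "CCXYZ"], true)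

def Spec_prepare_nice_labels_py (sbs192 : List String) (kk : Bool) (out : List String) : Prop := out = prepare_nice_labels_py_alt sbs192 kk
instance (sbs192 : List String) (kk : Bool) (out : List String) : Decidable (Spec_prepare_nice_labels_py sbs192 kk out) := by unfold Spec_prepare_nice_labels_py; infer_instance

-- ===== CLAIM (what is proved, stated in full; the proofs are below) =====
def Claim_equal_prepare_nice_labels_py : Prop := ∀ (sbs192 : List String) (kk : Bool), Dom_prepare_nice_labels_py sbs192 kk → Pre_prepare_nice_labels_py sbs192 kk → Spec_prepare_nice_labels_py sbs192 kk (prepare_nice_labels_py sbs192 kk)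

-- ===== LEMMAS AND PROOFS =====

-- A's tail: formatted labels with a "" before each element whose key differs from its predecessor's
def pvSpecA (kk : Bool) (p : String) : List String → List String
  | [] => []
  | x :: xs => (if pvKey x ≠ pvKey p then [""] else []) ++ pvFmt x kk :: pvSpecA kk x xs

theorem foldA_eq_specA (kk : Bool) (l : List String) (acc : List String) (p : String) :
    (l.foldl (pvStepA kk) (acc, some p)).1 = acc ++ pvSpecA kk p l := by
  induction l generalizing acc p with
  | nil => simp [pvSpecA]
  | cons x xs ih =>
      simp only [List.foldl_cons, pvSpecA]
      by_cases h : pvKey x ≠ pvKey p <;>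
        simp [pvStepA, h, ih]

-- B's tail: the flattened zip of boundary flags (key of p vs heads of ys) with the labels of ys
theorem flatB_eq_specA (kk : Bool) (p : String) (ys : List String) :
    (List.zipWith (fun sep lab => (if sep then [""] else []) ++ [lab])
        (List.zipWith (fun a b => decide (a ≠ b)) (pvKey p :: ys.map pvKey) (ys.map pvKey))
        (ys.map (fun s => pvFmt s kk))).flatten = pvSpecA kk p ys := by
  induction ys generalizing p with
  | nil => simp [pvSpecA]
  | cons y ys ih =>
      simp only [List.map_cons, List.zipWith_cons_cons, List.flatten_cons, pvSpecA]
      rw [ih]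
      by_cases h : pvKey y = pvKey p
      · simp [h]
      · simp [h, Ne.symm h]

-- the label list is a map of pvFmt in both kk cases
theorem labels_eq_map (kk : Bool) (l : List String) :
    (if kk then l.map pvLabel else l) = l.map (fun s => pvFmt s kk) := by
  cases kk <;> simp [pvFmt]

-- ===== VERDICT (by name: the statement is the Claim_ definition above) =====
theorem prepare_nice_labels_py_spec : Claim_equal_prepare_nice_labels_py := by
  intro sbs192 kk _ _
  show prepare_nice_labels_py sbs192 kk = prepare_nice_labels_py_alt sbs192 kk
  unfold prepare_nice_labels_py prepare_nice_labels_py_alt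
  rw [labels_eq_map]
  cases sbs192 with
  | nil => rfl
  | cons x xs =>
      rw [List.foldl_cons]
      have h1 : pvStepA kk ([], none) x = ([pvFmt x kk], some x) := by rfl
      rw [h1, foldA_eq_specA]
      simp only [List.map_cons, List.tail_cons, List.zipWith_cons_cons, List.flatten_cons,
        Bool.false_eq_true, if_false, List.nil_append, List.singleton_append]
      rw [flatB_eq_specA]
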